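-- pv_equiv track=rewrite | github.com/MikeSmvl/lights-out-bfs | bfs.py | getNodeVal
-- ===== SOURCE A (Python) =====
-- def getNodeVal(node) -> int:
-- 	"""Function that converts a node to an integer.
-- 	Ex: [[0,0,0],[1,0,1],[0,1,0]] -> 1*0 + 2*0 + 4*0 + 8*1 + 16*0 + 32*1 + 64*0 + 128*1 + 256*0 -> 168
--
-- 	Args:
-- 			node: The node to be converted to a value.
--
-- 	Returns:
-- 			The return value. Integer representation of node.
-- 	"""
-- 	val = 0
-- 	base = 1
-- 	for row in range(len(node)):
-- 		for col in range(len(node[0])):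
-- 			val += base * node[row][col]
-- 			base = base * 2
-- 	return val
-- ===== SOURCE B (Python) =====
-- def getNodeVal(node) -> int:
--     """Two-stage decomposition: first compute each row's value independently
--     as a shift-weighted sum, then combine the row values by whole-row block
--     shifts of width w, instead of one global pass with a running base."""
--     if not node:
--         return 0
--     w = len(node[0])
--     row_vals = [sum(row[c] << c for c in range(w)) for row in node]
--     total = 0
--     for rv in reversed(row_vals):
--         total = (total << w) + rv
--     return total
-- ===== Notes on version B (the rewrite author's own statement) =====
-- stated objective: faster
-- what changed: Replaces the single global pass with a running place-value base by a two-stage algorithm: each row's value is computed independently as a small shift-weighted sum, and the row values are then combined back-to-front by one whole-row block shift per row, so big-int arithmetic on the full-width accumulator happens once per row instead of once per cell.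
import Mathlib
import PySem

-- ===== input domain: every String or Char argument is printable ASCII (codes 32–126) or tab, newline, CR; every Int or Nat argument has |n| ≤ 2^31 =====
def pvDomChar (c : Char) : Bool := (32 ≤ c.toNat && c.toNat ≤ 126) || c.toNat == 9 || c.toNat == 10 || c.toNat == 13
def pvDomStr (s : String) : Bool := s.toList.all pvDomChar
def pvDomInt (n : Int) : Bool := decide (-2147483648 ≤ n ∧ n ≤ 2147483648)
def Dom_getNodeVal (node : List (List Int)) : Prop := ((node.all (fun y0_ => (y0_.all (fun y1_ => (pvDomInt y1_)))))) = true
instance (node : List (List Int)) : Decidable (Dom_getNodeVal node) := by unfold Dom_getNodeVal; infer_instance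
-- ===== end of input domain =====

-- B replaces A's single global pass with a running place-value base by a two-stage
-- algorithm: per-row shift-weighted values, then back-to-front block shifts of width w.

-- ===== PORT A =====
-- A: val = 0; base = 1; for row in range(len(node)): for col in range(len(node[0])):
--      val += base * node[row][col]; base *= 2
-- Indices come from range so are in range for rows; node[row][col] is ported as
-- List.getD (default 0), exact on Pre_ (which excludes the IndexError inputs).
def getNodeVal (node : List (List Int)) : Int :=
  ((List.range node.length).foldl
    (fun (p : Int × Int) row =>
      (List.range (node.headD []).length).foldl
        (fun (q : Int × Int) col =>
          (q.1 + q.2 * ((node.getD row []).getD col 0), q.2 * 2)) p)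
    (0, 1)).1

-- ===== PORT B =====
-- B: if not node: return 0; w = len(node[0]);
--    row_vals = [sum(row[c] << c for c in range(w)) for row in node]
--    total = 0; for rv in reversed(row_vals): total = (total << w) + rv
-- Python's x << k on an int is exactly x * 2^k (also for negative x), ported so;
-- sum(...) over the generator is ported as a foldl of (+) over range w.
def getNodeVal_alt (node : List (List Int)) : Int :=
  match node with
  | [] => 0
  | r0 :: _ =>
    let w := r0.length
    let rowVals := node.map (fun row =>
      (List.range w).foldl (fun (s : Int) c => s + row.getD c 0 * 2 ^ c) 0)
    rowVals.reverse.foldl (fun (total : Int) rv => total * 2 ^ w + rv) 0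

-- ===== PRECONDITION & SPEC =====
-- Pre_ excludes exactly the ragged grids on which Python A raises IndexError
-- (some row shorter than row 0); Python B raises there too.
def Pre_getNodeVal (node : List (List Int)) : Prop :=
  ∀ r ∈ node, (node.headD []).length ≤ r.length
instance (node : List (List Int)) : Decidable (Pre_getNodeVal node) := by
  unfold Pre_getNodeVal; infer_instance
def pvWitness_getNodeVal : List (List Int) := [[0, 0, 0], [1, 0, 1], [0, 1, 0]]

def Spec_getNodeVal (node : List (List Int)) (out : Int) : Prop := out = getNodeVal_alt node
instance (node : List (List Int)) (out : Int) : Decidable (Spec_getNodeVal node out) := by unfold Spec_getNodeVal; infer_instance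

-- ===== CLAIM (what is proved, stated in full; the proofs are below) =====
def Claim_equal_getNodeVal : Prop := ∀ (node : List (List Int)), Dom_getNodeVal node → Pre_getNodeVal node → Spec_getNodeVal node (getNodeVal node)

-- ===== LEMMAS AND PROOFS =====

-- Horner value of a list of cells: H [x0,x1,...] = x0 + 2*x1 + 4*x2 + ...
def pvH : List Int → Int
  | [] => 0
  | x :: l => x + 2 * pvH l

-- fold over indices with getD = fold over the list itself
theorem pv_foldl_range_getD {β : Type} (g : β → List Int → β) :
    ∀ (l : List (List Int)) (b : β),
      (List.range l.length).foldl (fun a i => g a (l.getD i [])) b = l.foldl g b := by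
  intro l
  induction l with
  | nil => intro b; simp
  | cons x xs ih =>
    intro b
    simp only [List.length_cons, List.range_succ_eq_map, List.foldl_cons, List.foldl_map]
    simpa using ih (g b x)

-- A's inner fold: state (val, base) advances by (val + base * H, base * 2^len)
theorem pvA_fold (f : Nat → Int) :
    ∀ (idx : List Nat) (v b : Int),
      idx.foldl (fun (q : Int × Int) c => (q.1 + q.2 * f c, q.2 * 2)) (v, b)
        = (v + b * pvH (idx.map f), b * 2 ^ idx.length) := by
  intro idx
  induction idx with
  | nil => intro v b; simp [pvH]
  | cons c cs ih =>
    intro v b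
    simp only [List.foldl_cons, ih, List.map_cons, pvH, List.length_cons]
    rw [Prod.mk.injEq]
    constructor <;> ring

-- row value: Horner value of the first n0 cells of row r (getD 0)
def pvRowH (n0 : Nat) (r : List Int) : Int := pvH ((List.range n0).map (fun c => r.getD c 0))

-- A's outer fold over the rows
theorem pvA_outer (n0 : Nat) :
    ∀ (rows : List (List Int)) (v b : Int),
      (rows.foldl
        (fun (p : Int × Int) r =>
          (List.range n0).foldl
            (fun (q : Int × Int) c => (q.1 + q.2 * r.getD c 0, q.2 * 2)) p)
        (v, b)).1
        = v + b * rows.foldr (fun r acc => pvRowH n0 r + 2 ^ n0 * acc) 0 := by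
  intro rows
  induction rows with
  | nil => intro v b; simp
  | cons r rs ih =>
    intro v b
    simp only [List.foldl_cons, List.foldr_cons]
    rw [pvA_fold (fun c => r.getD c 0) (List.range n0) v b, ih]
    simp only [List.length_range, pvRowH]
    ring

-- pvH of an appended singleton
theorem pvH_append_singleton (x : Int) :
    ∀ (l : List Int), pvH (l ++ [x]) = pvH l + 2 ^ l.length * x := by
  intro l
  induction l with
  | nil => simp [pvH]
  | cons y ys ih =>
    simp only [List.cons_append, pvH, ih, List.length_cons]
    ring

-- B's per-row shift-sum equals the Horner row value
theorem pvB_row (r : List Int) (n : Nat) :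
    ∀ (a : Int),
      (List.range n).foldl (fun (s : Int) c => s + r.getD c 0 * 2 ^ c) a
        = a + pvRowH n r := by
  induction n with
  | zero => intro a; simp [pvRowH, pvH]
  | succ m ih =>
    intro a
    rw [List.range_succ, List.foldl_append, ih]
    simp only [List.foldl_cons, List.foldl_nil, pvRowH, List.range_succ, List.map_append,
      List.map_cons, List.map_nil, pvH_append_singleton, List.length_map, List.length_range]
    ring

-- B's outer combine over the row values
theorem pvB_outer (n0 : Nat) :
    ∀ (rvs : List Int),
      rvs.reverse.foldl (fun (total : Int) rv => total * 2 ^ n0 + rv) 0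
        = rvs.foldr (fun rv acc => rv + 2 ^ n0 * acc) 0 := by
  intro rvs
  rw [List.foldl_reverse]
  induction rvs with
  | nil => simp
  | cons rv rvs ih =>
    simp only [List.foldr_cons, ih]
    ring

-- ===== VERDICT (by name: the statement is the Claim_ definition above) =====
theorem getNodeVal_spec : Claim_equal_getNodeVal := by
  intro node _ _
  unfold Spec_getNodeVal getNodeVal getNodeVal_alt
  cases node with
  | nil => simp
  | cons r0 rs =>
    simp only []
    rw [pv_foldl_range_getD
          (fun (p : Int × Int) r =>
            (List.range ((r0 :: rs).headD []).length).foldl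
              (fun (q : Int × Int) c => (q.1 + q.2 * r.getD c 0, q.2 * 2)) p),
        pvA_outer, pvB_outer, List.foldr_map]
    simp only [List.headD_cons, zero_add, one_mul]
    congr 1
    funext r acc
    rw [pvB_row r r0.length 0, zero_add]
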